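-- pv_equiv track=rewrite | github.com/chanrt/verbose-interpreter-python | helpers.py | isExpectingMore
-- ===== SOURCE A (Python) =====
-- def isExpectingMore(input_string):
--     num_paren_open = 0
--     num_square_open = 0
--     num_braces_open = 0
--     num_single_quotes = 0
--     num_double_quotes = 0
--
--     for character in input_string:
--         if character == "(":
--             num_paren_open += 1
--         elif character == ")":
--             num_paren_open -= 1
--         elif character == "[":
--             num_square_open += 1
--         elif character == "]":
--             num_square_open -= 1
--         elif character == "{":
--             num_braces_open += 1
--         elif character == "}":
--             num_braces_open -= 1
--         elif character == "'":
--             num_single_quotes += 1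
--         elif character == '"':
--             num_double_quotes += 1
--         elif character == "#":
--             break
--
--     if num_paren_open == 0 and num_square_open == 0 and num_braces_open == 0 and num_single_quotes % 2 == 0 and num_double_quotes % 2 == 0:
--         return False
--     else:
--         return True
-- ===== SOURCE B (Python) =====
-- def isExpectingMore(input_string):
--     head = input_string.partition('#')[0]
--     paren = head.count('(') - head.count(')')
--     square = head.count('[') - head.count(']')
--     brace = head.count('{') - head.count('}')
--     single = head.count("'")
--     double = head.count('"')
--     return not (paren == 0 and square == 0 and brace == 0
--                 and single % 2 == 0 and double % 2 == 0)
-- ===== Notes on version B (the rewrite author's own statement) =====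
-- stated objective: faster
-- what changed: Replaces the char-by-char elif state machine with truncation via partition followed by per-character count() scans and one boolean formula; the counting moves into C-level str.count.
import Mathlib
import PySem

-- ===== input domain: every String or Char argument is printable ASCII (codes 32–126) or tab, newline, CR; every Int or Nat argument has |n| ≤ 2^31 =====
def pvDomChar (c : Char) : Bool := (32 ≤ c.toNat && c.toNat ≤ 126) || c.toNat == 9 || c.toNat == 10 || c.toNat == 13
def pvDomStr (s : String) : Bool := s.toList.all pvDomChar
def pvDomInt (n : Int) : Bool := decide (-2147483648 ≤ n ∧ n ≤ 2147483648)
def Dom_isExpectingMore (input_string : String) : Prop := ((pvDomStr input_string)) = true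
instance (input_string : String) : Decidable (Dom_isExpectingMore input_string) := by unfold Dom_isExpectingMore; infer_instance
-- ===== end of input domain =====

-- B replaces A's single elif state machine by truncating at '#' and counting each character separately (objective: simpler).

-- ===== PORT A =====
-- the for-loop with break, carrying the five counters
def pvALoop : List Char → Int → Int → Int → Int → Int → Int × Int × Int × Int × Int
  | [], p, q, r, s, t => (p, q, r, s, t)
  | c :: cs, p, q, r, s, t =>
    if c = '(' then pvALoop cs (p + 1) q r s t
    else if c = ')' then pvALoop cs (p - 1) q r s t
    else if c = '[' then pvALoop cs p (q + 1) r s t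
    else if c = ']' then pvALoop cs p (q - 1) r s t
    else if c = '{' then pvALoop cs p q (r + 1) s t
    else if c = '}' then pvALoop cs p q (r - 1) s t
    else if c = '\'' then pvALoop cs p q r (s + 1) t
    else if c = '"' then pvALoop cs p q r s (t + 1)
    else if c = '#' then (p, q, r, s, t)
    else pvALoop cs p q r s t

def isExpectingMore (input_string : String) : Bool :=
  let st := pvALoop input_string.toList 0 0 0 0 0
  if st.1 = 0 ∧ st.2.1 = 0 ∧ st.2.2.1 = 0 ∧ PySem.Int.mod st.2.2.2.1 2 = 0 ∧ PySem.Int.mod st.2.2.2.2 2 = 0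
  then false else true

-- ===== PORT B =====
def isExpectingMore_alt (input_string : String) : Bool :=
  let head := input_string.toList.takeWhile (fun c => c ≠ '#')   -- partition('#')[0]
  let paren : Int := (head.count '(' : Int) - (head.count ')' : Int)
  let square : Int := (head.count '[' : Int) - (head.count ']' : Int)
  let brace : Int := (head.count '{' : Int) - (head.count '}' : Int)
  let single : Nat := head.count '\''
  let double : Nat := head.count '"'
  !(paren == 0 && square == 0 && brace == 0 && single % 2 == 0 && double % 2 == 0)

-- ===== PRECONDITION & SPEC =====
def Spec_isExpectingMore (input_string : String) (out : Bool) : Prop := out = isExpectingMore_alt input_string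
instance (input_string : String) (out : Bool) : Decidable (Spec_isExpectingMore input_string out) := by unfold Spec_isExpectingMore; infer_instance

-- ===== CLAIM (what is proved, stated in full; the proofs are below) =====
def Claim_equal_isExpectingMore : Prop := ∀ (input_string : String), Dom_isExpectingMore input_string → Spec_isExpectingMore input_string (isExpectingMore input_string)

-- ===== LEMMAS AND PROOFS =====

-- A's loop ends with each counter advanced by the counts over the prefix before the first '#'
theorem pvALoop_eq_counts (l : List Char) (p q r s t : Int) :
    pvALoop l p q r s t =
      (p + ((l.takeWhile (fun c => c ≠ '#')).count '(' : Int) - ((l.takeWhile (fun c => c ≠ '#')).count ')' : Int),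
       q + ((l.takeWhile (fun c => c ≠ '#')).count '[' : Int) - ((l.takeWhile (fun c => c ≠ '#')).count ']' : Int),
       r + ((l.takeWhile (fun c => c ≠ '#')).count '{' : Int) - ((l.takeWhile (fun c => c ≠ '#')).count '}' : Int),
       s + ((l.takeWhile (fun c => c ≠ '#')).count '\'' : Int),
       t + ((l.takeWhile (fun c => c ≠ '#')).count '"' : Int)) := by
  induction l generalizing p q r s t with
  | nil => simp [pvALoop]
  | cons c cs ih =>
    by_cases h1 : c = '('
    · subst h1; simp [pvALoop, List.takeWhile, List.count_cons, ih]; ring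
    by_cases h2 : c = ')'
    · subst h2; simp [pvALoop, List.takeWhile, List.count_cons, ih]; ring
    by_cases h3 : c = '['
    · subst h3; simp [pvALoop, List.takeWhile, List.count_cons, ih]; ring
    by_cases h4 : c = ']'
    · subst h4; simp [pvALoop, List.takeWhile, List.count_cons, ih]; ring
    by_cases h5 : c = '{'
    · subst h5; simp [pvALoop, List.takeWhile, List.count_cons, ih]; ring
    by_cases h6 : c = '}'
    · subst h6; simp [pvALoop, List.takeWhile, List.count_cons, ih]; ring
    by_cases h7 : c = '\''
    · subst h7; simp [pvALoop, List.takeWhile, List.count_cons, ih]; ring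
    by_cases h8 : c = '"'
    · subst h8; simp [pvALoop, List.takeWhile, List.count_cons, ih]; ring
    by_cases h9 : c = '#'
    · subst h9; simp [pvALoop, List.takeWhile, h1, h2, h3, h4, h5, h6, h7, h8]
    · simp [pvALoop, List.takeWhile, List.count_cons, ih,
        h1, h2, h3, h4, h5, h6, h7, h8, h9]

theorem mod_two_of_natCast (n : Nat) : PySem.Int.mod (n : Int) 2 = 0 ↔ n % 2 = 0 := by
  rw [PySem.Int.mod_eq_emod_of_pos (by omega : (0:Int) < 2)]
  omega

-- ===== VERDICT (by name: the statement is the Claim_ definition above) =====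
theorem isExpectingMore_spec : Claim_equal_isExpectingMore := by
  intro s _
  unfold Spec_isExpectingMore isExpectingMore isExpectingMore_alt
  rw [pvALoop_eq_counts]
  simp only [zero_add]
  set h := s.toList.takeWhile (fun c => c ≠ '#') with hh
  by_cases c1 : (h.count '(' : Int) - (h.count ')' : Int) = 0 <;>
    by_cases c2 : (h.count '[' : Int) - (h.count ']' : Int) = 0 <;>
    by_cases c3 : (h.count '{' : Int) - (h.count '}' : Int) = 0 <;>
    by_cases c4 : h.count '\'' % 2 = 0 <;>
    by_cases c5 : h.count '"' % 2 = 0 <;>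
    simp_all [mod_two_of_natCast] <;> omega
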